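-- pv_equiv track=rewrite | github.com/jerry-samek/tick-frame-space | experiments/40_tick-engine/tick_engine/laws/law000_xor.py | create_line_graph
-- ===== SOURCE A (Python) =====
-- from typing import Dict, List, Tuple
--
-- def create_line_graph(n: int) -> Tuple[Dict[int, List[int]], Dict[int, int]]:
--     """
--     Create a line graph: 0 — 1 — 2 — ... — (n-1)
--
--     Args:
--         n: Number of nodes
--
--     Returns:
--         (graph, initial_state) tuple
--     """
--     graph = {}
--     for i in range(n):
--         neighbors = []
--         if i > 0:
--             neighbors.append(i - 1)
--         if i < n - 1:
--             neighbors.append(i + 1)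
--         graph[i] = neighbors
--
--     # All start inactive except middle node
--     initial_state = {i: 0 for i in range(n)}
--     initial_state[n // 2] = 1  # activate middle
--
--     return graph, initial_state
-- ===== SOURCE B (Python) =====
-- from typing import Dict, List, Tuple
--
-- def create_line_graph(n: int) -> Tuple[Dict[int, List[int]], Dict[int, int]]:
--     # Column-wise construction: make one column of singleton neighbor cells,
--     # shift it right (left-neighbor column) and left (right-neighbor column)
--     # by slicing, zip the two columns into per-node neighbor lists, and
--     # assemble both dicts with dict(zip(...)) -- no per-node conditionals.
--     nodes = range(n)
--     cols = [[i] for i in nodes]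
--     lefts = [[]] + cols[:n - 1]
--     rights = cols[1:] + [[]]
--     neighbor_lists = [l + r for l, r in zip(lefts, rights)]
--     graph = dict(zip(nodes, neighbor_lists))
--
--     initial_state = dict(zip(nodes, [0] * n))
--     initial_state[n // 2] = 1  # activate middle
--
--     return graph, initial_state
-- ===== Notes on version B (the rewrite author's own statement) =====
-- stated objective: alternative
-- what changed: B constructs the adjacency column-wise: it builds one column of singleton neighbor cells, shifts it by slicing into a left-neighbor column and a right-neighbor column, zips the two columns into per-node neighbor lists, and assembles both dicts with dict(zip(...)), instead of A's loop that builds each node's list with two boundary conditionals and inserts key by key.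
import Mathlib
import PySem

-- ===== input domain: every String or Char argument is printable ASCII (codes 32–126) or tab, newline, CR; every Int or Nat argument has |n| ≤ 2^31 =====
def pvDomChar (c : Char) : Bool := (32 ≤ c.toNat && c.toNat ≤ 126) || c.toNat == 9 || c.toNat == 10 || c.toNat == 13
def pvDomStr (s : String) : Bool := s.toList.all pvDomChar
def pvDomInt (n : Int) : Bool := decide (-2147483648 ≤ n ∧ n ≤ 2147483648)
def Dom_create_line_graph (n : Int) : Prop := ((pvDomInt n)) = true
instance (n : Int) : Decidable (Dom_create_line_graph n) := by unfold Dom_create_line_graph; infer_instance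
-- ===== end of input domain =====

-- B builds the adjacency column-wise: one column of singleton neighbor cells, shifted by
-- slicing into left/right columns, zipped into neighbor lists; dicts via dict(zip(...)); same cost.

-- ===== PORT A =====
-- loop body of A's graph loop: neighbors = []; if i>0: append i-1; if i<n-1: append i+1
def pvNeighborsA (n i : Int) : List Int :=
  let neighbors : List Int := []
  let neighbors := if i > 0 then neighbors ++ [i - 1] else neighbors
  let neighbors := if i < n - 1 then neighbors ++ [i + 1] else neighbors
  neighbors

def create_line_graph (n : Int) : (List (Int × List Int)) × (List (Int × Int)) :=
  let graph : PySem.Dict Int (List Int) :=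
    (PySem.List.pyRange 0 n 1).foldl (fun g i => g.insert i (pvNeighborsA n i)) PySem.Dict.empty
  let initial_state : PySem.Dict Int Int :=
    (PySem.List.pyRange 0 n 1).foldl (fun d i => d.insert i 0) PySem.Dict.empty
  let initial_state := initial_state.insert (PySem.Int.floordiv n 2) 1
  (graph.items, initial_state.items)

-- ===== PORT B =====
def create_line_graph_alt (n : Int) : (List (Int × List Int)) × (List (Int × Int)) :=
  let nodes := PySem.List.pyRange 0 n 1
  let cols : List (List Int) := nodes.map (fun i => [i])
  let lefts : List (List Int) := [[]] ++ PySem.List.slice cols none (some (n - 1))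
  let rights : List (List Int) := PySem.List.slice cols (some 1) none ++ [[]]
  let neighbor_lists := (lefts.zip rights).map (fun p => p.1 ++ p.2)
  let graph : PySem.Dict Int (List Int) := PySem.Dict.ofList (nodes.zip neighbor_lists)
  let initial_state : PySem.Dict Int Int :=
    PySem.Dict.ofList (nodes.zip (List.replicate n.toNat (0 : Int)))
  let initial_state := initial_state.insert (PySem.Int.floordiv n 2) 1
  (graph.items, initial_state.items)

-- ===== PRECONDITION & SPEC =====
def Spec_create_line_graph (n : Int) (out : (List (Int × List Int)) × (List (Int × Int))) : Prop := out = create_line_graph_alt n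
instance (n : Int) (out : (List (Int × List Int)) × (List (Int × Int))) : Decidable (Spec_create_line_graph n out) := by unfold Spec_create_line_graph; infer_instance

-- ===== CLAIM (what is proved, stated in full; the proofs are below) =====
def Claim_equal_create_line_graph : Prop := ∀ (n : Int), Dom_create_line_graph n → Spec_create_line_graph n (create_line_graph n)

-- ===== LEMMAS AND PROOFS =====

-- pyRange 0 n with step 1 is the casted List.range n.toNat (also for n ≤ 0)
lemma pvPyRange0 (n : Int) :
    PySem.List.pyRange 0 n 1 = (List.range n.toNat).map (fun (k : Nat) => (k : Int)) := by
  rw [PySem.List.pyRange_one]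
  simp

lemma pvNodupCast (m : Nat) : ((List.range m).map (fun (k : Nat) => (k : Int))).Nodup := by
  refine List.Nodup.map ?_ List.nodup_range
  intro a b h
  exact Nat.cast_inj.mp h

-- dict(zip/...) over distinct keys: items of ofList are the pair list itself
lemma pvItemsOfListFresh {ν : Type} (l : List (Int × ν)) (hnd : (l.map Prod.fst).Nodup) :
    (PySem.Dict.ofList l).items = l := by
  have h : PySem.Dict.ofList l
      = l.foldl (fun d (p : Int × ν) => d.insert p.1 p.2) PySem.Dict.empty := rfl
  rw [h, PySem.Dict.items_foldl_insert_fresh l Prod.fst Prod.snd PySem.Dict.empty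
    (fun a _ => PySem.Dict.contains_empty a.1) hnd]
  simp [PySem.Dict.empty]

-- a foldl-insert loop over distinct fresh keys also lists its pairs in order
lemma pvItemsFoldlFresh {ν : Type} (m : Nat) (v : Int → ν) :
    (((List.range m).map (fun (k : Nat) => (k : Int))).foldl
        (fun d i => d.insert i (v i)) PySem.Dict.empty).items
      = ((List.range m).map (fun (k : Nat) => (k : Int))).map (fun i => (i, v i)) := by
  rw [PySem.Dict.items_foldl_insert_fresh _ (fun i => i) v PySem.Dict.empty
    (fun a _ => PySem.Dict.contains_empty a) (by simpa using pvNodupCast m)]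
  simp [PySem.Dict.empty]



-- the two boundary ifs agree with A's per-node neighbor construction
lemma pvElem (m' j : Nat) (hj : j < m' + 1) :
    ((if j = 0 then ([] : List Int) else [(j : Int) - 1]) ++
      (if j = m' then ([] : List Int) else [(j : Int) + 1]))
      = pvNeighborsA (((m' + 1 : Nat) : Int)) (j : Int) := by
  simp only [pvNeighborsA, List.nil_append, gt_iff_lt]
  have c1 : ((0 : Int) < (j : Int)) ↔ ¬ j = 0 := by omega
  have c2 : ((j : Int) < ((m' + 1 : Nat) : Int) - 1) ↔ ¬ j = m' := by push_cast; omega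
  by_cases h0 : j = 0 <;> by_cases h1 : j = m' <;> simp [h0, h1] <;>
    split_ifs <;> first | omega | rfl

-- B's zipped pair list is exactly A's per-node pair list
lemma pvZipEqMap (n : Int) (hn : 0 < n) :
    (((List.range n.toNat).map (fun (k : Nat) => (k : Int))).zip
        ((([( [] : List Int)] ++ PySem.List.slice
              (((List.range n.toNat).map (fun (k : Nat) => (k : Int))).map (fun i => [i]))
              none (some (n - 1))).zip
            (PySem.List.slice
              (((List.range n.toNat).map (fun (k : Nat) => (k : Int))).map (fun i => [i]))
              (some 1) none ++ [[]])).map (fun p => p.1 ++ p.2)))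
      = ((List.range n.toNat).map (fun (k : Nat) => (k : Int))).map
          (fun i => (i, pvNeighborsA n i)) := by
  have hm : n = (n.toNat : Int) := by omega
  generalize hmm : n.toNat = m at *
  obtain ⟨m', rfl⟩ : ∃ m', m = m' + 1 := ⟨m - 1, by omega⟩
  have h2 : (n - 1).toNat = m' := by omega
  have hL : ([( [] : List Int)] ++ PySem.List.slice
        ((((List.range (m' + 1)).map (fun (k : Nat) => (k : Int))).map (fun i => [i])))
        none (some (n - 1)))
      = (List.range (m' + 1)).map
          (fun (j : Nat) => if j = 0 then ([] : List Int) else [(j : Int) - 1]) := by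
    rw [PySem.List.slice_to _ (by omega : (0 : Int) ≤ n - 1), h2,
      ← List.map_take, ← List.map_take, List.take_range, Nat.min_eq_left (by omega)]
    conv_rhs => rw [List.range_succ_eq_map, List.map_cons]
    rw [List.map_map, List.map_map, List.singleton_append]
    congr 1
    apply List.map_congr_left
    intro k _
    simp only [Function.comp_apply, Nat.succ_eq_add_one, if_neg (Nat.succ_ne_zero k)]
    push_cast
    ring_nf
  have hR : (PySem.List.slice
        ((((List.range (m' + 1)).map (fun (k : Nat) => (k : Int))).map (fun i => [i])))
        (some 1) none ++ [( [] : List Int)])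
      = (List.range (m' + 1)).map
          (fun (j : Nat) => if j = m' then ([] : List Int) else [(j : Int) + 1]) := by
    conv_rhs => rw [List.range_succ, List.map_append]
    rw [PySem.List.slice_from _ (by omega : (0 : Int) ≤ 1), Int.toNat_one,
      ← List.map_drop, ← List.map_drop, List.range_succ_eq_map]
    simp only [List.drop_succ_cons, List.drop_zero]
    rw [List.map_map, List.map_map]
    congr 1
    · apply List.map_congr_left
      intro k hk
      have hk' : k < m' := List.mem_range.mp hk
      simp only [Function.comp_apply, Nat.succ_eq_add_one, if_neg (by omega : ¬ k = m')]
      push_cast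
      ring_nf
    · simp
  rw [hL, hR, List.zip_map', List.map_map, List.zip_map', List.map_map]
  apply List.map_congr_left
  intro j hj
  have hjm : j < m' + 1 := List.mem_range.mp hj
  simp only [Function.comp_apply, Prod.mk.injEq, true_and]
  rw [hm]
  exact pvElem m' j hjm

-- the replicate column zipped with the nodes is the per-node (i, 0) list
lemma pvZipZeros (m : Nat) :
    (((List.range m).map (fun (k : Nat) => (k : Int))).zip (List.replicate m (0 : Int)))
      = ((List.range m).map (fun (k : Nat) => (k : Int))).map (fun i => (i, (0 : Int))) := by
  have h : List.replicate m (0 : Int) = (List.range m).map (fun _ => (0 : Int)) := by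
    simp
  rw [h, List.zip_map', List.map_map]
  rfl

-- ===== VERDICT (by name: the statement is the Claim_ definition above) =====
theorem create_line_graph_spec : Claim_equal_create_line_graph := by
  intro n _
  unfold Spec_create_line_graph
  show create_line_graph n = create_line_graph_alt n
  simp only [create_line_graph, create_line_graph_alt]
  rw [pvPyRange0 n]
  refine Prod.ext ?_ ?_
  · -- graph component
    by_cases hn : 0 < n
    · rw [pvItemsFoldlFresh n.toNat (fun i => pvNeighborsA n i), pvZipEqMap n hn,
        pvItemsOfListFresh]
      rw [List.map_map]
      simpa using pvNodupCast n.toNat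
    · have h0 : n.toNat = 0 := by omega
      rw [h0]
      simp [PySem.Dict.empty, PySem.Dict.ofList, PySem.Dict.update]
  · -- initial_state component
    have h : ((List.range n.toNat).map (fun (k : Nat) => (k : Int))).foldl
          (fun d i => d.insert i (0 : Int)) PySem.Dict.empty
        = PySem.Dict.ofList (((List.range n.toNat).map (fun (k : Nat) => (k : Int))).zip
            (List.replicate n.toNat (0 : Int))) := by
      apply PySem.Dict.ext
      rw [pvItemsFoldlFresh n.toNat (fun _ => (0 : Int)), pvZipZeros n.toNat, pvItemsOfListFresh]
      rw [List.map_map]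
      simpa using pvNodupCast n.toNat
    rw [h]
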